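-- pv_equiv track=rewrite | github.com/FAIRmat-NFDI/pynxtools-em | src/pynxtools_em/concepts/mapping_functors_pint.py | var_path_to_spcfc_path
-- ===== SOURCE A (Python) =====
-- def var_path_to_spcfc_path(path: str, instance_identifier: list):
--     """Transforms a variadic path to an actual path with instances."""
--     if (path is not None) and (path != ""):
--         nvariadic_parts = path.count("*")
--         if nvariadic_parts == 0:  # path is not variadic
--             return path
--         if len(instance_identifier) >= nvariadic_parts:
--             variadic_part = path.split("*")
--             if len(variadic_part) == nvariadic_parts + 1:
--                 nx_specific_path = ""
--                 for idx in range(0, nvariadic_parts):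
--                     nx_specific_path += (
--                         f"{variadic_part[idx]}{instance_identifier[idx]}"
--                     )
--                     idx += 1
--                 nx_specific_path += f"{variadic_part[-1]}"
--                 return nx_specific_path
-- ===== SOURCE B (Python) =====
-- def var_path_to_spcfc_path(path: str, instance_identifier: list):
--     """Transforms a variadic path to an actual path with instances.
--
--     Single left-to-right scan of the path: each '*' is replaced by the next
--     identifier taken from an iterator (no split/index bookkeeping; inserted
--     identifiers are never rescanned, so identifiers containing '*' are safe).
--     """
--     if not path:
--         return None
--     n = path.count("*")
--     if n == 0:
--         return path
--     if len(instance_identifier) < n: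
--         return None
--     it = iter(instance_identifier)
--     return "".join(f"{next(it)}" if ch == "*" else ch for ch in path)
-- ===== Notes on version B (the rewrite author's own statement) =====
-- stated objective: idiomatic
-- what changed: Replaces split('*') plus an index-driven interleaving loop by a single left-to-right scan that substitutes each '*' with the next identifier drawn from an iterator.
import Mathlib
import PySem

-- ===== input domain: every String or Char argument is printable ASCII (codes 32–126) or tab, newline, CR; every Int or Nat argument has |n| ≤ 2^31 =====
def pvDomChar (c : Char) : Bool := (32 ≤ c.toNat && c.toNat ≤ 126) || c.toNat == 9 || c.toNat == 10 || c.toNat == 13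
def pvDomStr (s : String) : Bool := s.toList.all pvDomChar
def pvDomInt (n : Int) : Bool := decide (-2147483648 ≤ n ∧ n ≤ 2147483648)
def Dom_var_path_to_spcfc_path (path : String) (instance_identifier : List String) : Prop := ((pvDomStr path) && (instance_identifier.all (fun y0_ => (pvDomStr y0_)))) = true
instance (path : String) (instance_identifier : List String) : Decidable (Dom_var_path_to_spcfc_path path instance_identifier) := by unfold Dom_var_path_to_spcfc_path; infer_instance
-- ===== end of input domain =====

-- B replaces A's split('*') + index-interleaving loop by one left-to-right scan that
-- substitutes each '*' with the next identifier (idiomatic single pass); return values proved equal.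


-- ===== PORT A =====
-- literal transliteration of A: guard, count('*'), split('*'), indexed interleaving loop.
-- path.split('*') never raises (the separator is the non-empty literal "*"), so split? is some; .getD [] is never hit.
def var_path_to_spcfc_path (path : String) (instance_identifier : List String) : Option String :=
  if path ≠ "" then
    let nvariadic_parts : Nat := PySem.Str.count path "*"
    if nvariadic_parts = 0 then
      some path
    else if nvariadic_parts ≤ instance_identifier.length then
      let variadic_part : List String := (PySem.Str.split? path "*").getD []
      if variadic_part.length = nvariadic_parts + 1 then
        let nx_specific_path : String :=
          (PySem.List.pyRange 0 (nvariadic_parts : Int) 1).foldl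
            (fun acc idx =>
              acc ++ PySem.List.pyGetD variadic_part idx "" ++ PySem.List.pyGetD instance_identifier idx "") ""
        some (nx_specific_path ++ PySem.List.pyGetD variadic_part (-1) "")
      else none
    else none
  else none

-- ===== PORT B =====
-- the genexpr '"".join(next(it) if ch == "*" else ch for ch in path)' ported by hand as a
-- left-to-right recursion consuming the identifier list; exact: re-scanning never happens.
-- The [] branch at '*' is unreachable under the n ≤ len(instance_identifier) guard.
def substStars : List Char → List String → List Char
  | [], _ => []
  | c :: cs, ids =>
    if c = '*' then
      match ids with
      | i :: rest => i.toList ++ substStars cs rest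
      | [] => []
    else c :: substStars cs ids

def var_path_to_spcfc_path_alt (path : String) (instance_identifier : List String) : Option String :=
  if path = "" then none
  else
    let n : Nat := PySem.Str.count path "*"
    if n = 0 then some path
    else if instance_identifier.length < n then none
    else some (String.ofList (substStars path.toList instance_identifier))

-- ===== PRECONDITION & SPEC =====
def Spec_var_path_to_spcfc_path (path : String) (instance_identifier : List String) (out : Option String) : Prop := out = var_path_to_spcfc_path_alt path instance_identifier
instance (path : String) (instance_identifier : List String) (out : Option String) : Decidable (Spec_var_path_to_spcfc_path path instance_identifier out) := by unfold Spec_var_path_to_spcfc_path; infer_instance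

-- ===== CLAIM (what is proved, stated in full; the proofs are below) =====
def Claim_equal_var_path_to_spcfc_path : Prop := ∀ (path : String) (instance_identifier : List String), Dom_var_path_to_spcfc_path path instance_identifier → Spec_var_path_to_spcfc_path path instance_identifier (var_path_to_spcfc_path path instance_identifier)

-- ===== LEMMAS AND PROOFS =====

-- reference form of path.split("*"): accumulate the current piece directly
def splitStar : List Char → List Char → List (List Char)
  | pre, [] => [pre]
  | pre, c :: cs => if c = '*' then pre :: splitStar [] cs else splitStar (pre ++ [c]) cs

theorem splitOn_go_star (cs : List Char) : ∀ (fuel : Nat) (cur : List Char) (acc : List (List Char)),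
    cs.length ≤ fuel →
    PySem.Chars.splitOn.go ['*'] fuel cs cur acc = acc.reverse ++ splitStar cur.reverse cs := by
  induction cs with
  | nil =>
    intro fuel cur acc _
    cases fuel <;> simp [PySem.Chars.splitOn.go, splitStar]
  | cons c rest ih =>
    intro fuel cur acc hf
    cases fuel with
    | zero => simp at hf
    | succ f =>
      by_cases hc : c = '*'
      · subst hc
        have hp : List.isPrefixOf ['*'] ('*' :: rest) = true := by simp [List.isPrefixOf]
        simp only [PySem.Chars.splitOn.go, hp, if_pos, List.length_cons, List.length_nil,
          List.drop_succ_cons, List.drop_zero]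
        rw [ih f [] (cur.reverse :: acc) (by simpa using Nat.le_of_succ_le_succ hf)]
        simp [splitStar]
      · have hp : List.isPrefixOf ['*'] (c :: rest) = false := by
          simp [List.isPrefixOf]; exact fun h => absurd h.symm hc
        simp only [PySem.Chars.splitOn.go, hp]
        rw [if_neg (by simp)]
        rw [ih f (c :: cur) acc (by simpa using Nat.le_of_succ_le_succ hf)]
        simp [splitStar, hc]

theorem splitOn_star (cs : List Char) :
    PySem.Chars.splitOn cs ['*'] = splitStar [] cs := by
  have := splitOn_go_star cs (cs.length + 1) [] [] (by omega)
  simpa [PySem.Chars.splitOn] using this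

theorem count_go_star (cs : List Char) : ∀ (fuel acc : Nat),
    cs.length ≤ fuel →
    PySem.Chars.count.go ['*'] fuel cs acc = acc + cs.count '*' := by
  induction cs with
  | nil => intro fuel acc _; cases fuel <;> simp [PySem.Chars.count.go]
  | cons c rest ih =>
    intro fuel acc hf
    cases fuel with
    | zero => simp at hf
    | succ f =>
      by_cases hc : c = '*'
      · subst hc
        have hp : List.isPrefixOf ['*'] ('*' :: rest) = true := by simp [List.isPrefixOf]
        simp only [PySem.Chars.count.go, hp, if_pos, List.length_cons, List.length_nil,
          List.drop_succ_cons, List.drop_zero]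
        rw [ih f (acc + 1) (by simpa using Nat.le_of_succ_le_succ hf)]
        simp
        omega
      · have hp : List.isPrefixOf ['*'] (c :: rest) = false := by
          simp [List.isPrefixOf]; exact fun h => absurd h.symm hc
        simp only [PySem.Chars.count.go, hp]
        rw [if_neg (by simp)]
        rw [ih f acc (by simpa using Nat.le_of_succ_le_succ hf)]
        simp [hc]

theorem count_star (cs : List Char) :
    PySem.Chars.count cs ['*'] = cs.count '*' := by
  simp [PySem.Chars.count, count_go_star cs cs.length 0 le_rfl]

theorem length_splitStar (cs : List Char) : ∀ pre, (splitStar pre cs).length = cs.count '*' + 1 := by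
  induction cs with
  | nil => intro pre; simp [splitStar]
  | cons c rest ih =>
    intro pre
    by_cases hc : c = '*' <;> simp [splitStar, hc, ih]

theorem splitStar_ne_nil (cs : List Char) (pre : List Char) : splitStar pre cs ≠ [] := by
  intro h
  have := length_splitStar cs pre
  rw [h] at this
  simp at this

-- B's scan equals "flatten the interleaving of the split pieces with the identifiers, then the tail piece"
theorem interleave_splitStar (cs : List Char) : ∀ (ids : List String) (pre : List Char),
    cs.count '*' ≤ ids.length →
    (List.zipWith (fun (p : List Char) (i : String) => p ++ i.toList)
        ((splitStar pre cs).dropLast) (ids.take (cs.count '*'))).flatten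
      ++ (splitStar pre cs).getLast (splitStar_ne_nil cs pre)
      = pre ++ substStars cs ids := by
  induction cs with
  | nil => intro ids pre _; simp [splitStar, substStars]
  | cons c rest ih =>
    intro ids pre hlen
    by_cases hc : c = '*'
    · subst hc
      have hcnt : ('*' :: rest).count '*' = rest.count '*' + 1 := by simp
      cases ids with
      | nil => rw [hcnt] at hlen; simp at hlen
      | cons i is =>
        have hlen' : rest.count '*' ≤ is.length := by rw [hcnt] at hlen; simpa using hlen
        have hne : splitStar [] rest ≠ [] := splitStar_ne_nil rest []
        have hs : splitStar pre ('*' :: rest) = pre :: splitStar [] rest := by simp [splitStar]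
        have hdl : (pre :: splitStar [] rest).dropLast = pre :: (splitStar [] rest).dropLast :=
          List.dropLast_cons_of_ne_nil hne
        have hgl : (pre :: splitStar [] rest).getLast (by simp) =
            (splitStar [] rest).getLast hne := List.getLast_cons hne
        rw [hcnt]
        simp only [hs, hdl, List.take_succ_cons, List.zipWith_cons_cons, List.flatten_cons]
        rw [hgl]
        have := ih is [] hlen'
        simp only [List.append_assoc]
        rw [this]
        simp [substStars]
    · have hcnt : (c :: rest).count '*' = rest.count '*' := by simp [hc]
      have hs : splitStar pre (c :: rest) = splitStar (pre ++ [c]) rest := by simp [splitStar, hc]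
      rw [hcnt]
      have := ih ids (pre ++ [c]) (by rw [hcnt] at hlen; exact hlen)
      simp only [hs]
      rw [this]  -- may need getLast proof irrelevance
      simp [substStars, hc]

-- a string-building fold, viewed on the character lists
theorem toList_foldl_append (L : List Int) (f g : Int → String) :
    ∀ (a : String),
    (L.foldl (fun acc i => acc ++ f i ++ g i) a).toList
      = L.foldl (fun acc i => acc ++ (f i).toList ++ (g i).toList) a.toList := by
  induction L with
  | nil => intro a; simp
  | cons x xs ih => intro a; simp only [List.foldl_cons, ih]; simp

theorem foldl_append_flatten {α β : Type} (L : List β) (F : β → List α) :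
    ∀ (init : List α),
    L.foldl (fun acc k => acc ++ F k) init = init ++ (L.map F).flatten := by
  induction L with
  | nil => intro init; simp
  | cons x xs ih => intro init; simp [ih]

theorem range_map_getD (m : Nat) :
    ∀ (parts : List (List Char)) (ids : List String),
    m ≤ parts.length → m ≤ ids.length →
    (List.range m).map (fun k => parts.getD k [] ++ (ids.getD k "").toList)
      = List.zipWith (fun (p : List Char) (i : String) => p ++ i.toList) (parts.take m) (ids.take m) := by
  induction m with
  | zero => intro parts ids _ _; simp
  | succ n ih =>
    intro parts ids hp hi
    cases parts with
    | nil => simp at hp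
    | cons p ps =>
      cases ids with
      | nil => simp at hi
      | cons i is =>
        rw [List.range_succ_eq_map, List.map_cons, List.map_map]
        have hcomp : ((fun k => (p :: ps).getD k [] ++ (((i :: is).getD k "").toList)) ∘ Nat.succ)
            = (fun k => ps.getD k [] ++ ((is.getD k "").toList)) := by
          funext k; simp [List.getD]
        rw [hcomp, ih ps is (by simpa using hp) (by simpa using hi)]
        simp [List.getD]

theorem getD_map_toList (S : List (List Char)) (k : Nat) :
    ((S.map String.ofList).getD k "").toList = S.getD k [] := by
  simp only [List.getD, List.getElem?_map]
  cases S[k]? <;> simp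

theorem pyGetD_neg_one (xs : List String) (h : xs ≠ []) :
    PySem.List.pyGetD xs (-1) "" = xs.getLast h := by
  have hl : 0 < xs.length := List.length_pos_iff.mpr h
  have hc : (-(xs.length : Int) ≤ -1) := by omega
  have hidx : xs.length - 1 < xs.length := by omega
  simp [PySem.List.pyGetD, PySem.List.pyGet?, PySem.List.pyIdx?, hc,
    List.getLast_eq_getElem, List.getElem?_eq_getElem hidx]

theorem main_eq (path : String) (ids : List String) :
    var_path_to_spcfc_path path ids = var_path_to_spcfc_path_alt path ids := by
  by_cases hp : path = ""
  · simp [var_path_to_spcfc_path, var_path_to_spcfc_path_alt, hp]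
  · have hstar : ("*" : String).toList = ['*'] := rfl
    have hcount : PySem.Str.count path "*" = path.toList.count '*' := by
      rw [PySem.Str.count_eq, hstar, count_star]
    unfold var_path_to_spcfc_path var_path_to_spcfc_path_alt
    rw [if_pos (by exact hp : path ≠ ""), if_neg hp]
    simp only [hcount]
    by_cases h0 : path.toList.count '*' = 0
    · simp [h0]
    · rw [if_neg h0, if_neg h0]
      by_cases hle : path.toList.count '*' ≤ ids.length
      · rw [if_pos hle, if_neg (by omega : ¬ ids.length < path.toList.count '*')]
        have hsplit : (PySem.Str.split? path "*").getD []
            = (splitStar [] path.toList).map String.ofList := by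
          simp [PySem.Str.split?, PySem.Chars.split?, hstar, splitOn_star]
        rw [hsplit]
        have hlenS : (splitStar [] path.toList).length = path.toList.count '*' + 1 :=
          length_splitStar path.toList []
        rw [if_pos (by simpa using hlenS)]
        have hne : splitStar [] path.toList ≠ [] := splitStar_ne_nil path.toList []
        have hne' : (splitStar [] path.toList).map String.ofList ≠ [] := by simpa using hne
        congr 1
        rw [← String.toList_inj]
        rw [String.toList_append, toList_foldl_append]
        rw [pyGetD_neg_one _ hne', List.getLast_map]
        rw [PySem.List.pyRange_zero_nat, List.foldl_map]
        have hfn : (fun (acc : List Char) (k : Nat) =>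
              acc ++ (PySem.List.pyGetD ((splitStar [] path.toList).map String.ofList) (↑k) "").toList
                  ++ (PySem.List.pyGetD ids (↑k) "").toList)
            = (fun acc k => acc ++ ((splitStar [] path.toList).getD k [] ++ (ids.getD k "").toList)) := by
          funext acc k
          rw [PySem.List.pyGetD_natCast, PySem.List.pyGetD_natCast, getD_map_toList,
            List.append_assoc]
        rw [hfn, foldl_append_flatten,
          range_map_getD _ _ _ (by omega) hle]
        have hdrop : (splitStar [] path.toList).take (path.toList.count '*')
            = (splitStar [] path.toList).dropLast := by
          rw [List.dropLast_eq_take, hlenS]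
          simp
        rw [hdrop]
        have := interleave_splitStar path.toList ids [] hle
        simp only [List.nil_append] at this
        simp only [String.toList_ofList]
        rw [← this]
        simp
      · rw [if_neg hle, if_pos (by omega : ids.length < path.toList.count '*')]

-- ===== VERDICT (by name: the statement is the Claim_ definition above) =====
theorem var_path_to_spcfc_path_spec : Claim_equal_var_path_to_spcfc_path := by
  intro path ids _
  show var_path_to_spcfc_path path ids = var_path_to_spcfc_path_alt path ids
  exact main_eq path ids
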